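-- pv_equiv track=rewrite | github.com/EunJung803/Algorithm | Programmers/Lv2/완전탐색_전력망을둘로나누기.py | bfs
-- ===== SOURCE A (Python) =====
-- from collections import deque
--
-- def bfs(start_point, graph, visited, connected):
--     q = deque()
--     q.append(start_point)
--     visited[start_point] = 1
--     cnt = 1
--
--     while (q):
--         curr = q.popleft()
--
--         for i in range(len(graph[curr])):
--             next_point = graph[curr][i]
--             if(visited[next_point] == 0 and connected[curr][next_point] == 0):      # 이전에 탐색하지 않았고 현재 노드와 연결되어 있다면 -> 카운트
--                 visited[next_point] = 1
--                 q.append(next_point)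
--                 cnt += 1
--     return cnt
-- ===== SOURCE B (Python) =====
-- def bfs(start_point, graph, visited, connected):
--     # Recursive DFS instead of a queue-based BFS: mark the node, then for each
--     # still-unvisited neighbour not blocked by `connected`, recurse and add the
--     # size of that subtree.  Mutates `visited` in place exactly like A does
--     # (the same set of nodes ends up marked); the return value is the count.
--     visited[start_point] = 1
--     cnt = 1
--     for next_point in graph[start_point]:
--         if visited[next_point] == 0 and connected[start_point][next_point] == 0:
--             cnt += bfs(next_point, graph, visited, connected)
--     return cnt
-- ===== Notes on version B (the rewrite author's own statement) =====
-- stated objective: alternative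
-- what changed: A's deque-based BFS loop with an explicit counter is replaced by a recursive DFS that accumulates each subtree's node count through return values; the Lean proof shows the traversal order does not change the count.
-- outside the precondition, e.g. on bfs(0, [[1], []], [0, 0], [[0, 0], [0, 0], [9]]): A returns 2, B returns 2; on bfs(0, [[1], [0]], [0, 0], [[0, 0], [0]]): A returns 2, B returns 2
import Mathlib
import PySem

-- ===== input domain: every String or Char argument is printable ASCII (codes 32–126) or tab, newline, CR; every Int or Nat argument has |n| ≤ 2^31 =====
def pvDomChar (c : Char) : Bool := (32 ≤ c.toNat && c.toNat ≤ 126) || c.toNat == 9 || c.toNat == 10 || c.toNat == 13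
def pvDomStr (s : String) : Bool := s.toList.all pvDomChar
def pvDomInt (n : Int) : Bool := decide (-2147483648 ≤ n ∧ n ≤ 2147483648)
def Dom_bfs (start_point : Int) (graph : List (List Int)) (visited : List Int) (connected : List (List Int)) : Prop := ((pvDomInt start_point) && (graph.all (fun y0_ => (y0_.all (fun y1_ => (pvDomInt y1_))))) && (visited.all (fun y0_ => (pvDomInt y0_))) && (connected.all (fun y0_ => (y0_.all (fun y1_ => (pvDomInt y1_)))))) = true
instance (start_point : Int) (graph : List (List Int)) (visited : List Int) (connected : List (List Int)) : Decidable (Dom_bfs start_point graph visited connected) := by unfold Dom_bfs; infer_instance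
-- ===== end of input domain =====

-- B replaces A's deque-based BFS by a recursive DFS that accumulates subtree counts
-- through return values (alternative decomposition, same asymptotic cost; equivalence
-- of the RETURN value — in Python both mutate `visited` in place, marking the same set).


-- Lemmas needed by the ports' termination arguments (cited in decreasing_by).
theorem pvCount0_mark_lt (v : List Int) (j : Int)
    (h : PySem.List.pyGet? v j = some 0) :
    (PySem.List.pySetD v j 1).count 0 < v.count 0 := by
  unfold PySem.List.pyGet? at h
  cases hj : PySem.List.pyIdx? v.length j with
  | none => rw [hj] at h; simp at h
  | some m =>
    rw [hj] at h
    simp only [Option.bind_some] at h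
    have hm : m < v.length := by
      by_contra hge
      rw [List.getElem?_eq_none (by omega)] at h
      simp at h
    have hv0 : v[m] = 0 := by
      rw [List.getElem?_eq_getElem hm] at h
      exact Option.some.inj h
    have hset : PySem.List.pySetD v j 1 = v.set m 1 := by
      unfold PySem.List.pySetD PySem.List.pySet?
      rw [hj]; rfl
    rw [hset, List.set_eq_take_append_cons_drop, if_pos hm]
    conv_rhs => rw [← List.take_append_drop m v, ← List.getElem_cons_drop hm]
    simp [List.count_append, hv0]

-- ===== PORT A =====
-- One neighbour step of A's inner `for` loop over graph[curr]; state = (q, visited, cnt).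
def bfsStep (connected : List (List Int)) (curr : Int)
    (st : List Int × List Int × Int) (j : Int) : List Int × List Int × Int :=
  if PySem.List.pyGet? st.2.1 j = some 0 ∧
     PySem.List.pyGetD (PySem.List.pyGetD connected curr []) j 1 = 0 then
    (st.1 ++ [j], PySem.List.pySetD st.2.1 j 1, st.2.2 + 1)
  else st

theorem pvBfsStep_le (connected : List (List Int)) (curr : Int)
    (st : List Int × List Int × Int) (j : Int) :
    (bfsStep connected curr st j).1.length + (bfsStep connected curr st j).2.1.count 0
      ≤ st.1.length + st.2.1.count 0 := by
  unfold bfsStep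
  split_ifs with h
  · have := pvCount0_mark_lt st.2.1 j h.1
    simp; omega
  · omega

theorem pvBfsFold_le (connected : List (List Int)) (curr : Int)
    (row : List Int) (st : List Int × List Int × Int) :
    (row.foldl (bfsStep connected curr) st).1.length
      + (row.foldl (bfsStep connected curr) st).2.1.count 0
      ≤ st.1.length + st.2.1.count 0 := by
  induction row generalizing st with
  | nil => simp
  | cons j rest ih =>
    simp only [List.foldl_cons]
    exact le_trans (ih (bfsStep connected curr st j)) (pvBfsStep_le connected curr st j)

-- A's `while q:` loop (q, visited, cnt); popleft, then the inner for-loop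
-- (`for i in range(len(graph[curr])): next_point = graph[curr][i]`) is the fold
-- of bfsStep over the row graph[curr].
def bfsLoop (graph connected : List (List Int)) :
    List Int → List Int → Int → Int
  | [], _, c => c
  | curr :: rest, v, c =>
    let st := (PySem.List.pyGetD graph curr []).foldl (bfsStep connected curr) (rest, v, c)
    bfsLoop graph connected st.1 st.2.1 st.2.2
termination_by q v _ => q.length + v.count 0
decreasing_by
  have := pvBfsFold_le connected curr (PySem.List.pyGetD graph curr []) (rest, v, c)
  simp only [List.length_cons]
  dsimp only at this
  omega

def bfs (start_point : Int) (graph : List (List Int)) (visited : List Int)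
    (connected : List (List Int)) : Int :=
  bfsLoop graph connected [start_point] (PySem.List.pySetD visited start_point 1) 1

-- ===== PORT B =====
-- B's recursive DFS: mark u, cnt = 1, then for each neighbour that is unvisited and
-- not blocked, add the recursive count.  `fuel` is only a totality guard: each
-- recursive call consumes a fresh zero of `visited`, so `visited.count 0 + 1` never
-- runs out (proved below); it does not alter the computation B performs.
def dfsGo (graph connected : List (List Int)) :
    Nat → Int → List Int → Int × List Int
  | 0, u, v => (1, PySem.List.pySetD v u 1)
  | fuel + 1, u, v =>
    (PySem.List.pyGetD graph u []).foldl
      (fun st j =>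
        if PySem.List.pyGet? st.2 j = some 0 ∧
           PySem.List.pyGetD (PySem.List.pyGetD connected u []) j 1 = 0 then
          let r := dfsGo graph connected fuel j st.2
          (st.1 + r.1, r.2)
        else st)
      (1, PySem.List.pySetD v u 1)

def bfs_alt (start_point : Int) (graph : List (List Int)) (visited : List Int)
    (connected : List (List Int)) : Int :=
  (dfsGo graph connected (visited.count 0 + 1) start_point visited).1

-- ===== PRECONDITION & SPEC =====
-- Pre_: inputs on which Python A returns, in two readable shapes: either the
-- traversal provably stops after start's row (start index valid for visited and
-- graph, every neighbour a valid visited index, and no neighbour both unvisited and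
-- unblocked — each blocked check being a valid connected access), or the instance is
-- fully well-formed (graph/connected square of size n = len(visited) with all graph
-- entries valid indices).  This excludes some inputs whose malformed part is simply
-- unreachable and on which A still returns (see claim cites).
def Pre_bfs (start_point : Int) (graph : List (List Int)) (visited : List Int)
    (connected : List (List Int)) : Prop :=
  (PySem.Raise.InRange visited.length start_point ∧
   PySem.Raise.InRange graph.length start_point ∧
   ∀ j ∈ PySem.List.pyGetD graph start_point [],
     PySem.Raise.InRange visited.length j ∧
     (PySem.List.pyGet? (PySem.List.pySetD visited start_point 1) j = some 0 →
       PySem.Raise.InRange connected.length start_point ∧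
       PySem.Raise.InRange (PySem.List.pyGetD connected start_point []).length j ∧
       PySem.List.pyGetD (PySem.List.pyGetD connected start_point []) j 1 ≠ 0)) ∨
  (PySem.Raise.InRange visited.length start_point ∧
   graph.length = visited.length ∧
   connected.length = visited.length ∧
   (∀ r ∈ connected, r.length = visited.length) ∧
   (∀ r ∈ graph, ∀ j ∈ r, PySem.Raise.InRange visited.length j))
instance (start_point : Int) (graph : List (List Int)) (visited : List Int) (connected : List (List Int)) : Decidable (Pre_bfs start_point graph visited connected) := by unfold Pre_bfs; infer_instance

def pvWitness_bfs : Int × List (List Int) × List Int × List (List Int) :=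
  (0, [[1], [0]], [0, 0], [[0, 0], [0, 0]])

def Spec_bfs (start_point : Int) (graph : List (List Int)) (visited : List Int) (connected : List (List Int)) (out : Int) : Prop := out = bfs_alt start_point graph visited connected
instance (start_point : Int) (graph : List (List Int)) (visited : List Int) (connected : List (List Int)) (out : Int) : Decidable (Spec_bfs start_point graph visited connected out) := by unfold Spec_bfs; infer_instance

-- ===== CLAIM (what is proved, stated in full; the proofs are below) =====
def Claim_equal_bfs : Prop := ∀ (start_point : Int) (graph : List (List Int)) (visited : List Int) (connected : List (List Int)), Dom_bfs start_point graph visited connected → Pre_bfs start_point graph visited connected → Spec_bfs start_point graph visited connected (bfs start_point graph visited connected)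

-- ===== LEMMAS AND PROOFS =====

-- ---------- low-level lemmas about Python indexing / assignment ----------

theorem pvIdx_lt {n : Nat} {i : Int} {m : Nat}
    (h : PySem.List.pyIdx? n i = some m) : m < n := by
  unfold PySem.List.pyIdx? at h
  split_ifs at h with h1 h2 h3 <;> simp_all <;> omega

theorem pvSetD_none {α : Type} {w : List α} {j : Int} (x : α)
    (h : PySem.List.pyIdx? w.length j = none) :
    PySem.List.pySetD w j x = w := by
  unfold PySem.List.pySetD PySem.List.pySet?; rw [h]; rfl

theorem pvSetD_some {α : Type} {w : List α} {j : Int} {a : Nat} (x : α)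
    (h : PySem.List.pyIdx? w.length j = some a) :
    PySem.List.pySetD w j x = w.set a x := by
  unfold PySem.List.pySetD PySem.List.pySet?; rw [h]; rfl

theorem pvLen_mark (v : List Int) (j : Int) :
    (PySem.List.pySetD v j 1).length = v.length := PySem.List.length_pySetD v j 1

theorem pvGet_some_isSome {v : List Int} {j : Int} {x : Int}
    (h : PySem.List.pyGet? v j = some x) :
    (PySem.List.pyIdx? v.length j).isSome = true := by
  unfold PySem.List.pyGet? at h
  cases hj : PySem.List.pyIdx? v.length j with
  | none => rw [hj] at h; simp at h
  | some a => simp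

theorem pvGet_set (v : List Int) (j k : Int) (x : Int) :
    PySem.List.pyGet? (PySem.List.pySetD v j x) k =
      if PySem.List.pyIdx? v.length j = PySem.List.pyIdx? v.length k ∧
         (PySem.List.pyIdx? v.length j).isSome = true then some x
      else PySem.List.pyGet? v k := by
  cases hj : PySem.List.pyIdx? v.length j with
  | none =>
    rw [pvSetD_none x hj, if_neg (by simp)]
  | some a =>
    rw [pvSetD_some x hj]
    have ha : a < v.length := pvIdx_lt hj
    unfold PySem.List.pyGet?
    rw [List.length_set]
    cases hk : PySem.List.pyIdx? v.length k with
    | none => simp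
    | some b =>
      simp only [Option.bind_some]
      rw [List.getElem?_set]
      by_cases hab : a = b
      · subst hab
        simp [ha]
      · simp [hab]

theorem pvSame_getD {α : Type} (xs : List α) (l k : Int) (d : α) {n : Nat}
    (hn : xs.length = n)
    (h : PySem.List.pyIdx? n l = PySem.List.pyIdx? n k) :
    PySem.List.pyGetD xs l d = PySem.List.pyGetD xs k d := by
  unfold PySem.List.pyGetD PySem.List.pyGet?
  rw [hn, h]

theorem pvSame_set (v : List Int) (l k : Int) (x : Int) {n : Nat}
    (hn : v.length = n)
    (h : PySem.List.pyIdx? n l = PySem.List.pyIdx? n k) :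
    PySem.List.pySetD v l x = PySem.List.pySetD v k x := by
  unfold PySem.List.pySetD PySem.List.pySet?
  rw [hn, h]

theorem pvMark_comm (v : List Int) (j k : Int) :
    PySem.List.pySetD (PySem.List.pySetD v j 1) k 1
      = PySem.List.pySetD (PySem.List.pySetD v k 1) j 1 := by
  cases hj : PySem.List.pyIdx? v.length j with
  | none =>
    rw [pvSetD_none 1 hj, pvSetD_none (w := PySem.List.pySetD v k 1) 1
      (by rw [pvLen_mark]; exact hj)]
  | some a =>
    cases hk : PySem.List.pyIdx? v.length k with
    | none =>
      rw [pvSetD_none 1 hk, pvSetD_none (w := PySem.List.pySetD v j 1) 1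
        (by rw [pvLen_mark]; exact hk)]
    | some b =>
      rw [pvSetD_some 1 hj, pvSetD_some 1 hk,
        pvSetD_some (w := v.set a 1) 1 (by rw [List.length_set]; exact hk),
        pvSetD_some (w := v.set b 1) 1 (by rw [List.length_set]; exact hj)]
      by_cases hab : a = b
      · subst hab; rfl
      · exact List.set_comm 1 1 hab

theorem pvCount0_mark_le (v : List Int) (j : Int) :
    (PySem.List.pySetD v j 1).count 0 ≤ v.count 0 := by
  cases hj : PySem.List.pyIdx? v.length j with
  | none => rw [pvSetD_none 1 hj]
  | some a =>
    have ha : a < v.length := pvIdx_lt hj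
    rw [pvSetD_some 1 hj, List.set_eq_take_append_cons_drop, if_pos ha,
      List.count_append]
    conv_rhs => rw [← List.take_append_drop a v, ← List.getElem_cons_drop ha]
    rw [List.count_append, List.count_cons, List.count_cons]
    simp only [beq_iff_eq]
    split_ifs <;> omega

-- ---------- the abstract edge machine ----------
-- State: an agenda of jobs (node, remaining neighbour row), the visited list, the
-- count.  One step inspects the first remaining edge of the first job; a fresh,
-- unblocked target is marked, counted, and enqueued as a new job — at the BACK for
-- runB (A's breadth-first order) and at the FRONT for runD (B's depth-first order).

def asize (a : List (Int × List Int)) : Nat :=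
  (a.map (fun t => t.2.length)).sum + a.length

def runB (g cn : List (List Int)) :
    List (Int × List Int) → List Int → Int → Int
  | [], _, c => c
  | (_, []) :: ts, v, c => runB g cn ts v c
  | (u, j :: row) :: ts, v, c =>
    if h : PySem.List.pyGet? v j = some 0 ∧
           PySem.List.pyGetD (PySem.List.pyGetD cn u []) j 1 = 0 then
      runB g cn ((u, row) :: ts ++ [(j, PySem.List.pyGetD g j [])])
        (PySem.List.pySetD v j 1) (c + 1)
    else runB g cn ((u, row) :: ts) v c
termination_by a v _ => (v.count 0, asize a)
decreasing_by
  all_goals first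
    | exact Prod.Lex.left _ _ (pvCount0_mark_lt v j h.1)
    | exact Prod.Lex.right _ (by simp [asize])

def runD (g cn : List (List Int)) :
    List (Int × List Int) → List Int → Int → Int
  | [], _, c => c
  | (_, []) :: ts, v, c => runD g cn ts v c
  | (u, j :: row) :: ts, v, c =>
    if h : PySem.List.pyGet? v j = some 0 ∧
           PySem.List.pyGetD (PySem.List.pyGetD cn u []) j 1 = 0 then
      runD g cn ((j, PySem.List.pyGetD g j []) :: (u, row) :: ts)
        (PySem.List.pySetD v j 1) (c + 1)
    else runD g cn ((u, row) :: ts) v c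
termination_by a v _ => (v.count 0, asize a)
decreasing_by
  all_goals first
    | exact Prod.Lex.left _ _ (pvCount0_mark_lt v j h.1)
    | exact Prod.Lex.right _ (by simp [asize])

theorem pvFresh_unmark {v : List Int} {k : Int} (j : Int)
    (h : PySem.List.pyGet? (PySem.List.pySetD v j 1) k = some 0) :
    PySem.List.pyGet? v k = some 0 := by
  rw [pvGet_set] at h
  split_ifs at h with hc
  · simp at h
  · exact h

theorem runB_nil (g cn : List (List Int)) (v : List Int) (c : Int) :
    runB g cn [] v c = c := by rw [runB]

theorem runB_drop (g cn : List (List Int)) {u : Int} {ts : List (Int × List Int)}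
    {v : List Int} {c : Int} :
    runB g cn ((u, ([] : List Int)) :: ts) v c = runB g cn ts v c := by rw [runB]

theorem runB_pos (g cn : List (List Int)) {u j : Int} {row : List Int}
    {ts : List (Int × List Int)} {v : List Int} {c : Int}
    (h : PySem.List.pyGet? v j = some 0 ∧
         PySem.List.pyGetD (PySem.List.pyGetD cn u []) j 1 = 0) :
    runB g cn ((u, j :: row) :: ts) v c
      = runB g cn ((u, row) :: ts ++ [(j, PySem.List.pyGetD g j [])])
          (PySem.List.pySetD v j 1) (c + 1) := by
  rw [runB]; rw [dif_pos h]

theorem runB_neg (g cn : List (List Int)) {u j : Int} {row : List Int}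
    {ts : List (Int × List Int)} {v : List Int} {c : Int}
    (h : ¬(PySem.List.pyGet? v j = some 0 ∧
           PySem.List.pyGetD (PySem.List.pyGetD cn u []) j 1 = 0)) :
    runB g cn ((u, j :: row) :: ts) v c = runB g cn ((u, row) :: ts) v c := by
  rw [runB]; rw [dif_neg h]

theorem runD_nil (g cn : List (List Int)) (v : List Int) (c : Int) :
    runD g cn [] v c = c := by rw [runD]

theorem runD_drop (g cn : List (List Int)) {u : Int} {ts : List (Int × List Int)}
    {v : List Int} {c : Int} :
    runD g cn ((u, ([] : List Int)) :: ts) v c = runD g cn ts v c := by rw [runD]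

theorem runD_pos (g cn : List (List Int)) {u j : Int} {row : List Int}
    {ts : List (Int × List Int)} {v : List Int} {c : Int}
    (h : PySem.List.pyGet? v j = some 0 ∧
         PySem.List.pyGetD (PySem.List.pyGetD cn u []) j 1 = 0) :
    runD g cn ((u, j :: row) :: ts) v c
      = runD g cn ((j, PySem.List.pyGetD g j []) :: (u, row) :: ts)
          (PySem.List.pySetD v j 1) (c + 1) := by
  rw [runD]; rw [dif_pos h]

theorem runD_neg (g cn : List (List Int)) {u j : Int} {row : List Int}
    {ts : List (Int × List Int)} {v : List Int} {c : Int}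
    (h : ¬(PySem.List.pyGet? v j = some 0 ∧
           PySem.List.pyGetD (PySem.List.pyGetD cn u []) j 1 = 0)) :
    runD g cn ((u, j :: row) :: ts) v c = runD g cn ((u, row) :: ts) v c := by
  rw [runD]; rw [dif_neg h]

theorem pvAsize_cons (p : Int × List Int) (ts : List (Int × List Int)) :
    asize (p :: ts) = p.2.length + 1 + asize ts := by
  simp [asize]; omega

theorem pvAsize_perm {a b : List (Int × List Int)} (h : a.Perm b) :
    asize a = asize b := by
  unfold asize
  rw [(h.map _).sum_eq, h.length_eq]

-- ---------- order-invariance bundle for runB ----------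

def DeadP (g cn : List (List Int)) (n z s : Nat) : Prop :=
  ∀ (pre : List (Int × List Int)) (u k : Int) (rest : List Int)
    (post : List (Int × List Int)) (v : List Int) (c : Int),
    v.length = n → v.count 0 ≤ z → asize (pre ++ (u, k :: rest) :: post) ≤ s →
    ¬(PySem.List.pyGet? v k = some 0 ∧
      PySem.List.pyGetD (PySem.List.pyGetD cn u []) k 1 = 0) →
    runB g cn (pre ++ (u, k :: rest) :: post) v c
      = runB g cn (pre ++ (u, rest) :: post) v c

def EmpP (g cn : List (List Int)) (n z s : Nat) : Prop :=
  ∀ (pre : List (Int × List Int)) (u : Int) (post : List (Int × List Int))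
    (v : List Int) (c : Int),
    v.length = n → v.count 0 ≤ z → asize (pre ++ (u, ([] : List Int)) :: post) ≤ s →
    runB g cn (pre ++ (u, ([] : List Int)) :: post) v c = runB g cn (pre ++ post) v c

def CongP (g cn : List (List Int)) (n z s : Nat) : Prop :=
  ∀ (pre : List (Int × List Int)) (l k : Int) (row : List Int)
    (post : List (Int × List Int)) (v : List Int) (c : Int),
    v.length = n → v.count 0 ≤ z → asize (pre ++ (l, row) :: post) ≤ s →
    PySem.List.pyIdx? n l = PySem.List.pyIdx? n k →
    runB g cn (pre ++ (l, row) :: post) v c = runB g cn (pre ++ (k, row) :: post) v c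

def PullP (g cn : List (List Int)) (n z s : Nat) : Prop :=
  ∀ (pre : List (Int × List Int)) (u k : Int) (rest : List Int)
    (post : List (Int × List Int)) (v : List Int) (c : Int),
    v.length = n → v.count 0 ≤ z → asize (pre ++ (u, k :: rest) :: post) ≤ s →
    PySem.List.pyGet? v k = some 0 →
    PySem.List.pyGetD (PySem.List.pyGetD cn u []) k 1 = 0 →
    runB g cn (pre ++ (u, k :: rest) :: post) v c
      = runB g cn ((pre ++ (u, rest) :: post) ++ [(k, PySem.List.pyGetD g k [])])
          (PySem.List.pySetD v k 1) (c + 1)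

def PermP (g cn : List (List Int)) (n z s : Nat) : Prop :=
  ∀ (a b : List (Int × List Int)) (v : List Int) (c : Int),
    v.length = n → v.count 0 ≤ z → asize a ≤ s → a.Perm b →
    runB g cn a v c = runB g cn b v c

theorem pvBundle (g cn : List (List Int)) (n : Nat)
    (Hg : g.length = n) (Hc : cn.length = n) :
    ∀ z s : Nat, DeadP g cn n z s ∧ EmpP g cn n z s ∧ CongP g cn n z s ∧
      PullP g cn n z s ∧ PermP g cn n z s := by
  intro z
  induction z using Nat.strong_induction_on with
  | _ z IHz =>
  intro s
  induction s using Nat.strong_induction_on with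
  | _ s IHs =>
  have hDead : DeadP g cn n z s := by
    intro pre u k rest post v c Hv Hz Hs hdead
    cases pre with
    | nil =>
      simp only [List.nil_append]
      exact runB_neg g cn hdead
    | cons p pre' =>
      obtain ⟨w, lw⟩ := p
      cases lw with
      | nil =>
        simp only [List.cons_append]
        rw [runB_drop, runB_drop]
        refine (IHs (asize (pre' ++ (u, k :: rest) :: post)) ?_).1
          pre' u k rest post v c Hv Hz le_rfl hdead
        simp only [List.cons_append, pvAsize_cons] at Hs; omega
      | cons l lw' =>
        simp only [List.cons_append]
        by_cases hl : PySem.List.pyGet? v l = some 0 ∧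
            PySem.List.pyGetD (PySem.List.pyGetD cn w []) l 1 = 0
        · rw [runB_pos g cn hl, runB_pos g cn hl]
          simp only [List.cons_append, List.append_assoc]
          have hz' : (PySem.List.pySetD v l 1).count 0 < z :=
            lt_of_lt_of_le (pvCount0_mark_lt v l hl.1) Hz
          have hdead' : ¬(PySem.List.pyGet? (PySem.List.pySetD v l 1) k = some 0 ∧
              PySem.List.pyGetD (PySem.List.pyGetD cn u []) k 1 = 0) :=
            fun hh => hdead ⟨pvFresh_unmark l hh.1, hh.2⟩
          exact (IHz _ hz' _).1 ((w, lw') :: pre') u k rest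
            (post ++ [(l, PySem.List.pyGetD g l [])])
            (PySem.List.pySetD v l 1) (c + 1)
            (by rw [pvLen_mark]; exact Hv) le_rfl le_rfl hdead'
        · rw [runB_neg g cn hl, runB_neg g cn hl]
          refine (IHs (asize ((w, lw') :: pre' ++ (u, k :: rest) :: post)) ?_).1
            ((w, lw') :: pre') u k rest post v c Hv Hz le_rfl hdead
          simp only [List.cons_append, pvAsize_cons, List.length_cons] at Hs ⊢
          omega
  have hEmp : EmpP g cn n z s := by
    intro pre u post v c Hv Hz Hs
    cases pre with
    | nil =>
      simp only [List.nil_append]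
      exact runB_drop g cn
    | cons p pre' =>
      obtain ⟨w, lw⟩ := p
      cases lw with
      | nil =>
        simp only [List.cons_append]
        rw [runB_drop, runB_drop]
        refine (IHs (asize (pre' ++ (u, ([] : List Int)) :: post)) ?_).2.1
          pre' u post v c Hv Hz le_rfl
        simp only [List.cons_append, pvAsize_cons] at Hs; omega
      | cons l lw' =>
        simp only [List.cons_append]
        by_cases hl : PySem.List.pyGet? v l = some 0 ∧
            PySem.List.pyGetD (PySem.List.pyGetD cn w []) l 1 = 0
        · rw [runB_pos g cn hl, runB_pos g cn hl]
          simp only [List.cons_append, List.append_assoc]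
          have hz' : (PySem.List.pySetD v l 1).count 0 < z :=
            lt_of_lt_of_le (pvCount0_mark_lt v l hl.1) Hz
          exact (IHz _ hz' _).2.1 ((w, lw') :: pre') u
            (post ++ [(l, PySem.List.pyGetD g l [])])
            (PySem.List.pySetD v l 1) (c + 1)
            (by rw [pvLen_mark]; exact Hv) le_rfl le_rfl
        · rw [runB_neg g cn hl, runB_neg g cn hl]
          refine (IHs (asize ((w, lw') :: pre' ++ (u, ([] : List Int)) :: post)) ?_).2.1
            ((w, lw') :: pre') u post v c Hv Hz le_rfl
          simp only [List.cons_append, pvAsize_cons, List.length_cons] at Hs ⊢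
          omega
  have hCong : CongP g cn n z s := by
    intro pre l k row post v c Hv Hz Hs hidx
    have hcn : PySem.List.pyGetD cn l [] = PySem.List.pyGetD cn k [] :=
      pvSame_getD cn l k [] Hc hidx
    cases pre with
    | nil =>
      simp only [List.nil_append]
      cases row with
      | nil => rw [runB_drop, runB_drop]
      | cons j row' =>
        by_cases hj : PySem.List.pyGet? v j = some 0 ∧
            PySem.List.pyGetD (PySem.List.pyGetD cn l []) j 1 = 0
        · have hj2 : PySem.List.pyGet? v j = some 0 ∧
              PySem.List.pyGetD (PySem.List.pyGetD cn k []) j 1 = 0 :=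
            ⟨hj.1, by rw [← hcn]; exact hj.2⟩
          rw [runB_pos g cn hj, runB_pos g cn hj2]
          simp only [List.cons_append]
          have hz' : (PySem.List.pySetD v j 1).count 0 < z :=
            lt_of_lt_of_le (pvCount0_mark_lt v j hj.1) Hz
          exact (IHz _ hz' _).2.2.1 [] l k row'
            (post ++ [(j, PySem.List.pyGetD g j [])])
            (PySem.List.pySetD v j 1) (c + 1)
            (by rw [pvLen_mark]; exact Hv) le_rfl le_rfl hidx
        · have hj2 : ¬(PySem.List.pyGet? v j = some 0 ∧
              PySem.List.pyGetD (PySem.List.pyGetD cn k []) j 1 = 0) :=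
            fun hh => hj ⟨hh.1, by rw [hcn]; exact hh.2⟩
          rw [runB_neg g cn hj, runB_neg g cn hj2]
          refine (IHs (asize ((l, row') :: post)) ?_).2.2.1 [] l k row' post v c
            Hv Hz le_rfl hidx
          simp only [List.nil_append, pvAsize_cons, List.length_cons] at Hs ⊢
          omega
    | cons p pre' =>
      obtain ⟨w, lw⟩ := p
      cases lw with
      | nil =>
        simp only [List.cons_append]
        rw [runB_drop, runB_drop]
        refine (IHs (asize (pre' ++ (l, row) :: post)) ?_).2.2.1
          pre' l k row post v c Hv Hz le_rfl hidx
        simp only [List.cons_append, pvAsize_cons] at Hs; omega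
      | cons e lw' =>
        simp only [List.cons_append]
        by_cases he : PySem.List.pyGet? v e = some 0 ∧
            PySem.List.pyGetD (PySem.List.pyGetD cn w []) e 1 = 0
        · rw [runB_pos g cn he, runB_pos g cn he]
          simp only [List.cons_append, List.append_assoc]
          have hz' : (PySem.List.pySetD v e 1).count 0 < z :=
            lt_of_lt_of_le (pvCount0_mark_lt v e he.1) Hz
          exact (IHz _ hz' _).2.2.1 ((w, lw') :: pre') l k row
            (post ++ [(e, PySem.List.pyGetD g e [])])
            (PySem.List.pySetD v e 1) (c + 1)
            (by rw [pvLen_mark]; exact Hv) le_rfl le_rfl hidx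
        · rw [runB_neg g cn he, runB_neg g cn he]
          refine (IHs (asize ((w, lw') :: pre' ++ (l, row) :: post)) ?_).2.2.1
            ((w, lw') :: pre') l k row post v c Hv Hz le_rfl hidx
          simp only [List.cons_append, pvAsize_cons, List.length_cons] at Hs ⊢
          omega
  have hPull : PullP g cn n z s := by
    intro pre u k rest post v c Hv Hz Hs hfk hck
    have hkSome : (PySem.List.pyIdx? v.length k).isSome = true := pvGet_some_isSome hfk
    cases pre with
    | nil =>
      simp only [List.nil_append]
      rw [runB_pos g cn ⟨hfk, hck⟩]
    | cons p pre' =>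
      obtain ⟨w, lw⟩ := p
      cases lw with
      | nil =>
        simp only [List.cons_append]
        rw [runB_drop, runB_drop]
        refine (IHs (asize (pre' ++ (u, k :: rest) :: post)) ?_).2.2.2.1
          pre' u k rest post v c Hv Hz le_rfl hfk hck
        simp only [List.cons_append, pvAsize_cons] at Hs; omega
      | cons l lw' =>
        simp only [List.cons_append]
        by_cases hl : PySem.List.pyGet? v l = some 0 ∧
            PySem.List.pyGetD (PySem.List.pyGetD cn w []) l 1 = 0
        · by_cases hkl : PySem.List.pyGet? (PySem.List.pySetD v k 1) l = some 0
          · -- the two fresh targets are distinct cells: commute the two marks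
            have hne : ¬(PySem.List.pyIdx? v.length l = PySem.List.pyIdx? v.length k ∧
                (PySem.List.pyIdx? v.length l).isSome = true) := by
              rintro ⟨he, -⟩
              rw [pvGet_set, if_pos ⟨he.symm, hkSome⟩] at hkl
              simp at hkl
            have hfk' : PySem.List.pyGet? (PySem.List.pySetD v l 1) k = some 0 := by
              rw [pvGet_set, if_neg hne]; exact hfk
            rw [runB_pos g cn hl, runB_pos g cn ⟨hkl, hl.2⟩]
            have hz1 : (PySem.List.pySetD v l 1).count 0 < z :=
              lt_of_lt_of_le (pvCount0_mark_lt v l hl.1) Hz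
            have e1 := (IHz _ hz1 _).2.2.2.1 ((w, lw') :: pre') u k rest
              (post ++ [(l, PySem.List.pyGetD g l [])])
              (PySem.List.pySetD v l 1) (c + 1)
              (by rw [pvLen_mark]; exact Hv) le_rfl le_rfl hfk' hck
            simp only [List.cons_append, List.append_assoc] at e1 ⊢
            rw [e1, pvMark_comm]
            have hz2 : (PySem.List.pySetD (PySem.List.pySetD v k 1) l 1).count 0 < z :=
              lt_of_le_of_lt (pvCount0_mark_le _ l)
                (lt_of_lt_of_le (pvCount0_mark_lt v k hfk) Hz)
            exact (IHz _ hz2 _).2.2.2.2 _ _ _ _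
              (by rw [pvLen_mark, pvLen_mark]; exact Hv) le_rfl le_rfl
              (List.Perm.cons _ (List.Perm.append_left pre' (List.Perm.cons _
                (List.Perm.append_left post (List.Perm.swap _ _ _)))))
          · -- same cell: the pulled edge's target was just marked by the head edge
            have hsame : PySem.List.pyIdx? v.length k = PySem.List.pyIdx? v.length l := by
              by_contra hne
              apply hkl
              rw [pvGet_set, if_neg (fun hh => hne hh.1)]
              exact hl.1
            have hsame' : PySem.List.pyIdx? n k = PySem.List.pyIdx? n l := by
              rw [← Hv]; exact hsame
            have hmark_eq : PySem.List.pySetD v l 1 = PySem.List.pySetD v k 1 :=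
              pvSame_set v l k 1 rfl hsame.symm
            have hrow_eq : PySem.List.pyGetD g l [] = PySem.List.pyGetD g k [] :=
              pvSame_getD g l k [] Hg hsame'.symm
            rw [runB_pos g cn hl, runB_neg g cn (fun hh => hkl hh.1)]
            rw [hmark_eq, hrow_eq]
            have hz1 : (PySem.List.pySetD v k 1).count 0 < z :=
              lt_of_lt_of_le (pvCount0_mark_lt v k hfk) Hz
            have hdeadk : ¬(PySem.List.pyGet? (PySem.List.pySetD v k 1) k = some 0 ∧
                PySem.List.pyGetD (PySem.List.pyGetD cn u []) k 1 = 0) := by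
              rintro ⟨hh, -⟩
              rw [pvGet_set, if_pos ⟨rfl, hkSome⟩] at hh
              simp at hh
            have e1 := (IHz _ hz1 _).1 ((w, lw') :: pre') u k rest
              (post ++ [(l, PySem.List.pyGetD g k [])])
              (PySem.List.pySetD v k 1) (c + 1)
              (by rw [pvLen_mark]; exact Hv) le_rfl le_rfl hdeadk
            simp only [List.cons_append, List.append_assoc] at e1 ⊢
            rw [e1]
            have e2 := (IHz _ hz1 _).2.2.1 ((w, lw') :: pre' ++ (u, rest) :: post)
              l k (PySem.List.pyGetD g k []) [] (PySem.List.pySetD v k 1) (c + 1)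
              (by rw [pvLen_mark]; exact Hv) le_rfl le_rfl hsame'.symm
            simp only [List.cons_append, List.append_assoc] at e2
            rw [e2]
        · have hl' : ¬(PySem.List.pyGet? (PySem.List.pySetD v k 1) l = some 0 ∧
              PySem.List.pyGetD (PySem.List.pyGetD cn w []) l 1 = 0) :=
            fun hh => hl ⟨pvFresh_unmark k hh.1, hh.2⟩
          rw [runB_neg g cn hl, runB_neg g cn hl']
          refine (IHs (asize ((w, lw') :: pre' ++ (u, k :: rest) :: post)) ?_).2.2.2.1
            ((w, lw') :: pre') u k rest post v c Hv Hz le_rfl hfk hck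
          simp only [List.cons_append, pvAsize_cons, List.length_cons] at Hs ⊢
          omega
  have hPerm : PermP g cn n z s := by
    have aux : ∀ (a b : List (Int × List Int)), a.Perm b → ∀ (v : List Int) (c : Int),
        v.length = n → v.count 0 ≤ z → asize a ≤ s →
        runB g cn a v c = runB g cn b v c := by
      intro a b hp
      induction hp with
      | nil => intro v c _ _ _; rfl
      | cons x hp' IH =>
        intro v c Hv Hz Hs
        obtain ⟨u, lw⟩ := x
        cases lw with
        | nil =>
          rw [runB_drop, runB_drop]
          refine (IHs (asize _) ?_).2.2.2.2 _ _ v c Hv Hz le_rfl hp'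
          rw [pvAsize_cons] at Hs; omega
        | cons j lw' =>
          by_cases hj : PySem.List.pyGet? v j = some 0 ∧
              PySem.List.pyGetD (PySem.List.pyGetD cn u []) j 1 = 0
          · rw [runB_pos g cn hj, runB_pos g cn hj]
            have hz' : (PySem.List.pySetD v j 1).count 0 < z :=
              lt_of_lt_of_le (pvCount0_mark_lt v j hj.1) Hz
            exact (IHz _ hz' _).2.2.2.2 _ _ _ _
              (by rw [pvLen_mark]; exact Hv) le_rfl le_rfl
              (List.Perm.cons _ (hp'.append_right _))
          · rw [runB_neg g cn hj, runB_neg g cn hj]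
            refine (IHs (asize _) ?_).2.2.2.2 _ _ v c Hv Hz le_rfl
              (List.Perm.cons _ hp')
            simp only [pvAsize_cons, List.length_cons] at Hs ⊢; omega
      | swap x y t =>
        -- a = y :: x :: t, b = x :: y :: t
        intro v c Hv Hz Hs
        obtain ⟨uy, ly⟩ := y
        cases ly with
        | nil =>
          rw [runB_drop]
          have e0 := hEmp [x] uy t v c Hv Hz (by
            simp only [pvAsize_cons, List.singleton_append, List.length_nil] at Hs ⊢
            omega)
          simp only [List.nil_append, List.cons_append] at e0
          rw [e0]
        | cons j ly' =>
          by_cases hj : PySem.List.pyGet? v j = some 0 ∧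
              PySem.List.pyGetD (PySem.List.pyGetD cn uy []) j 1 = 0
          · rw [runB_pos g cn hj]
            have e0 := hPull [x] uy j ly' t v c Hv Hz (by
              simp only [pvAsize_cons, List.singleton_append, List.length_cons] at Hs ⊢
              omega) hj.1 hj.2
            simp only [List.cons_append, List.nil_append] at e0
            rw [e0]
            have hz' : (PySem.List.pySetD v j 1).count 0 < z :=
              lt_of_lt_of_le (pvCount0_mark_lt v j hj.1) Hz
            simp only [List.cons_append]
            exact (IHz _ hz' _).2.2.2.2 _ _ _ _
              (by rw [pvLen_mark]; exact Hv) le_rfl le_rfl (List.Perm.swap _ _ _)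
          · rw [runB_neg g cn hj]
            have e0 := hDead [x] uy j ly' t v c Hv Hz (by
              simp only [pvAsize_cons, List.singleton_append, List.length_cons] at Hs ⊢
              omega) hj
            simp only [List.nil_append, List.cons_append] at e0
            rw [e0]
            refine (IHs (asize ((uy, ly') :: x :: t)) ?_).2.2.2.2 _ _ v c Hv Hz
              le_rfl (List.Perm.swap _ _ _)
            simp only [pvAsize_cons, List.length_cons] at Hs ⊢; omega
      | trans hp1 hp2 IH1 IH2 =>
        intro v c Hv Hz Hs
        rw [IH1 v c Hv Hz Hs, IH2 v c Hv Hz (by rw [← pvAsize_perm hp1]; exact Hs)]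
    intro a b v c Hv Hz Hs hp
    exact aux a b hp v c Hv Hz Hs
  exact ⟨hDead, hEmp, hCong, hPull, hPerm⟩

-- ---------- runB agrees with runD (cross lemma via permutation invariance) ----------

theorem pvRunBD (g cn : List (List Int)) (n : Nat)
    (Hg : g.length = n) (Hc : cn.length = n) :
    ∀ (z s : Nat) (a : List (Int × List Int)) (v : List Int) (c : Int),
      v.length = n → v.count 0 ≤ z → asize a ≤ s →
      runB g cn a v c = runD g cn a v c := by
  intro z
  induction z using Nat.strong_induction_on with
  | _ z IHz =>
  intro s
  induction s using Nat.strong_induction_on with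
  | _ s IHs =>
  intro a v c Hv Hz Hs
  match a with
  | [] => rw [runB_nil, runD_nil]
  | (u, []) :: ts =>
    rw [runB_drop, runD_drop]
    refine IHs (asize ts) ?_ ts v c Hv Hz le_rfl
    rw [pvAsize_cons] at Hs; simp at Hs; omega
  | (u, j :: row) :: ts =>
    by_cases hj : PySem.List.pyGet? v j = some 0 ∧
        PySem.List.pyGetD (PySem.List.pyGetD cn u []) j 1 = 0
    · rw [runB_pos g cn hj, runD_pos g cn hj]
      have hz' : (PySem.List.pySetD v j 1).count 0 < z :=
        lt_of_lt_of_le (pvCount0_mark_lt v j hj.1) Hz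
      have hperm : ((u, row) :: ts ++ [(j, PySem.List.pyGetD g j [])]).Perm
          ((j, PySem.List.pyGetD g j []) :: (u, row) :: ts) :=
        List.Perm.trans (List.Perm.cons _ (List.perm_append_singleton _ _))
          (List.Perm.swap _ _ _)
      rw [(pvBundle g cn n Hg Hc ((PySem.List.pySetD v j 1).count 0) (asize ((u, row) :: ts ++ [(j, PySem.List.pyGetD g j [])]))).2.2.2.2
        _ _ _ _ (by rw [pvLen_mark]; exact Hv) le_rfl le_rfl hperm]
      exact IHz _ hz' (asize ((j, PySem.List.pyGetD g j []) :: (u, row) :: ts)) _ _ _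
        (by rw [pvLen_mark]; exact Hv) le_rfl le_rfl
    · rw [runB_neg g cn hj, runD_neg g cn hj]
      refine IHs (asize ((u, row) :: ts)) ?_ _ v c Hv Hz le_rfl
      simp only [pvAsize_cons, List.length_cons] at Hs ⊢; omega

-- ---------- port A equals runB ----------

theorem pvFold_q (cn : List (List Int)) (u : Int) :
    ∀ (row : List Int) (q0 : List Int) (v : List Int) (c : Int),
      row.foldl (bfsStep cn u) (q0, v, c)
        = (q0 ++ (row.foldl (bfsStep cn u) ([], v, c)).1,
           (row.foldl (bfsStep cn u) ([], v, c)).2) := by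
  intro row
  induction row with
  | nil => intro q0 v c; simp
  | cons j rest IH =>
    intro q0 v c
    simp only [List.foldl_cons]
    by_cases h : PySem.List.pyGet? v j = some 0 ∧
        PySem.List.pyGetD (PySem.List.pyGetD cn u []) j 1 = 0
    · have e1 : bfsStep cn u (q0, v, c) j
          = (q0 ++ [j], PySem.List.pySetD v j 1, c + 1) := by
        unfold bfsStep; rw [if_pos h]
      have e2 : bfsStep cn u ([], v, c) j
          = ([j], PySem.List.pySetD v j 1, c + 1) := by
        unfold bfsStep; rw [if_pos h]; rfl
      rw [e1, e2, IH (q0 ++ [j]), IH [j]]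
      simp
    · have e1 : bfsStep cn u (q0, v, c) j = (q0, v, c) := by
        unfold bfsStep; rw [if_neg h]
      have e2 : bfsStep cn u ([], v, c) j = ([], v, c) := by
        unfold bfsStep; rw [if_neg h]
      rw [e1, e2, IH q0]

theorem pvRowL (g cn : List (List Int)) (u : Int) :
    ∀ (row : List Int) (v : List Int) (c : Int) (ts : List (Int × List Int)),
      runB g cn ((u, row) :: ts) v c
        = runB g cn
            (ts ++ (row.foldl (bfsStep cn u) ([], v, c)).1.map
              (fun j => (j, PySem.List.pyGetD g j [])))
            (row.foldl (bfsStep cn u) ([], v, c)).2.1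
            (row.foldl (bfsStep cn u) ([], v, c)).2.2 := by
  intro row
  induction row with
  | nil => intro v c ts; rw [runB_drop]; simp
  | cons j rest IH =>
    intro v c ts
    simp only [List.foldl_cons]
    by_cases h : PySem.List.pyGet? v j = some 0 ∧
        PySem.List.pyGetD (PySem.List.pyGetD cn u []) j 1 = 0
    · rw [runB_pos g cn h]
      simp only [List.cons_append]
      have e2 : bfsStep cn u ([], v, c) j
          = ([j], PySem.List.pySetD v j 1, c + 1) := by
        unfold bfsStep; rw [if_pos h]; rfl
      rw [e2, IH (PySem.List.pySetD v j 1) (c + 1)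
        (ts ++ [(j, PySem.List.pyGetD g j [])]), pvFold_q cn u rest [j]]
      simp
    · rw [runB_neg g cn h]
      have e1 : bfsStep cn u ([], v, c) j = ([], v, c) := by
        unfold bfsStep; rw [if_neg h]
      rw [e1]
      exact IH v c ts

theorem pvA2M (g cn : List (List Int)) :
    ∀ (m : Nat) (q : List Int) (v : List Int) (c : Int),
      q.length + v.count 0 ≤ m →
      bfsLoop g cn q v c
        = runB g cn (q.map (fun u => (u, PySem.List.pyGetD g u []))) v c := by
  intro m
  induction m using Nat.strong_induction_on with
  | _ m IHm =>
  intro q v c Hm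
  match q with
  | [] => rw [bfsLoop]; simp only [List.map_nil, runB_nil]
  | u :: rest =>
    rw [bfsLoop]
    rw [pvFold_q cn u (PySem.List.pyGetD g u []) rest v c]
    have hle := pvBfsFold_le cn u (PySem.List.pyGetD g u []) (rest, v, c)
    rw [pvFold_q cn u (PySem.List.pyGetD g u []) rest v c] at hle
    dsimp only at hle
    have hm' : (rest ++ (List.foldl (bfsStep cn u) ([], v, c) (PySem.List.pyGetD g u [])).1).length
        + (List.foldl (bfsStep cn u) ([], v, c) (PySem.List.pyGetD g u [])).2.1.count 0 < m := by
      simp only [List.length_cons] at Hm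
      omega
    rw [IHm _ (by omega : (rest ++ (List.foldl (bfsStep cn u) ([], v, c) (PySem.List.pyGetD g u [])).1).length
        + (List.foldl (bfsStep cn u) ([], v, c) (PySem.List.pyGetD g u [])).2.1.count 0 < m) _ _ _ le_rfl]
    rw [List.map_cons, pvRowL g cn u (PySem.List.pyGetD g u []) v c]
    rw [List.map_append]

-- ---------- port B equals runD ----------

theorem pvDfs_mono (g cn : List (List Int)) :
    ∀ (fuel : Nat) (u : Int) (v : List Int),
      (dfsGo g cn fuel u v).2.count 0 ≤ v.count 0 := by
  intro fuel
  induction fuel with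
  | zero => intro u v; exact pvCount0_mark_le v u
  | succ f IH =>
    intro u v
    rw [dfsGo]
    have aux : ∀ (row : List Int) (st : Int × List Int),
        (row.foldl (fun st j =>
          if PySem.List.pyGet? st.2 j = some 0 ∧
             PySem.List.pyGetD (PySem.List.pyGetD cn u []) j 1 = 0 then
            let r := dfsGo g cn f j st.2
            (st.1 + r.1, r.2)
          else st) st).2.count 0 ≤ st.2.count 0 := by
      intro row
      induction row with
      | nil => intro st; simp
      | cons j rest IHr =>
        intro st
        simp only [List.foldl_cons]
        by_cases h : PySem.List.pyGet? st.2 j = some 0 ∧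
            PySem.List.pyGetD (PySem.List.pyGetD cn u []) j 1 = 0
        · rw [if_pos h]
          exact le_trans (IHr _) (IH j st.2)
        · rw [if_neg h]
          exact IHr st
    exact le_trans (aux _ _) (pvCount0_mark_le v u)

theorem pvB2M (g cn : List (List Int)) :
    ∀ (fuel : Nat) (u : Int) (v : List Int) (ts : List (Int × List Int)) (c : Int),
      (PySem.List.pySetD v u 1).count 0 < fuel →
      runD g cn ((u, PySem.List.pyGetD g u []) :: ts) (PySem.List.pySetD v u 1) c
        = runD g cn ts (dfsGo g cn fuel u v).2 (c + (dfsGo g cn fuel u v).1 - 1) := by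
  intro fuel
  induction fuel with
  | zero => intro u v ts c h; exact absurd h (Nat.not_lt_zero _)
  | succ f IH =>
    intro u v ts c h
    have aux : ∀ (row : List Int) (st : Int × List Int) (ts : List (Int × List Int)) (cm : Int),
        st.2.count 0 ≤ f →
        runD g cn ((u, row) :: ts) st.2 cm
          = runD g cn ts
              (row.foldl (fun st j =>
                if PySem.List.pyGet? st.2 j = some 0 ∧
                   PySem.List.pyGetD (PySem.List.pyGetD cn u []) j 1 = 0 then
                  let r := dfsGo g cn f j st.2
                  (st.1 + r.1, r.2)
                else st) st).2
              (cm + ((row.foldl (fun st j =>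
                if PySem.List.pyGet? st.2 j = some 0 ∧
                   PySem.List.pyGetD (PySem.List.pyGetD cn u []) j 1 = 0 then
                  let r := dfsGo g cn f j st.2
                  (st.1 + r.1, r.2)
                else st) st).1 - st.1)) := by
      intro row
      induction row with
      | nil =>
        intro st ts cm _
        rw [runD_drop]
        simp
      | cons j rest IHr =>
        intro st ts cm hst
        simp only [List.foldl_cons]
        by_cases hjc : PySem.List.pyGet? st.2 j = some 0 ∧
            PySem.List.pyGetD (PySem.List.pyGetD cn u []) j 1 = 0
        · rw [runD_pos g cn hjc, if_pos hjc]
          have hfj : (PySem.List.pySetD st.2 j 1).count 0 < f :=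
            lt_of_lt_of_le (pvCount0_mark_lt st.2 j hjc.1) hst
          rw [IH j st.2 ((u, rest) :: ts) (cm + 1) hfj]
          have harith : cm + 1 + (dfsGo g cn f j st.2).1 - 1
              = cm + (dfsGo g cn f j st.2).1 := by ring
          rw [harith]
          have hst' : (dfsGo g cn f j st.2).2.count 0 ≤ f :=
            le_trans (pvDfs_mono g cn f j st.2) hst
          rw [IHr (st.1 + (dfsGo g cn f j st.2).1, (dfsGo g cn f j st.2).2) ts
            (cm + (dfsGo g cn f j st.2).1) hst']
          congr 1
          ring
        · rw [runD_neg g cn hjc, if_neg hjc]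
          exact IHr st ts cm hst
    rw [dfsGo]
    simp only []
    have h1 : (PySem.List.pySetD v u 1).count 0 ≤ f := by omega
    rw [aux (PySem.List.pyGetD g u []) (1, PySem.List.pySetD v u 1) ts c h1]
    congr 1
    ring

-- ---------- assembling the final theorem ----------

theorem pvSkipRowA (cn : List (List Int)) (u : Int) :
    ∀ (row q : List Int) (v : List Int) (c : Int),
      (∀ j ∈ row, ¬(PySem.List.pyGet? v j = some 0 ∧
        PySem.List.pyGetD (PySem.List.pyGetD cn u []) j 1 = 0)) →
      row.foldl (bfsStep cn u) (q, v, c) = (q, v, c) := by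
  intro row
  induction row with
  | nil => intro q v c _; rfl
  | cons j rest IH =>
    intro q v c h
    simp only [List.foldl_cons]
    have e1 : bfsStep cn u (q, v, c) j = (q, v, c) := by
      unfold bfsStep; rw [if_neg (h j (List.mem_cons_self))]
    rw [e1]
    exact IH q v c (fun i hi => h i (List.mem_cons_of_mem _ hi))

theorem pvSkipRowB (g cn : List (List Int)) (u : Int) (f : Nat) :
    ∀ (row : List Int) (st : Int × List Int),
      (∀ j ∈ row, ¬(PySem.List.pyGet? st.2 j = some 0 ∧
        PySem.List.pyGetD (PySem.List.pyGetD cn u []) j 1 = 0)) →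
      row.foldl (fun st j =>
        if PySem.List.pyGet? st.2 j = some 0 ∧
           PySem.List.pyGetD (PySem.List.pyGetD cn u []) j 1 = 0 then
          let r := dfsGo g cn f j st.2
          (st.1 + r.1, r.2)
        else st) st = st := by
  intro row
  induction row with
  | nil => intro st _; rfl
  | cons j rest IH =>
    intro st h
    simp only [List.foldl_cons]
    rw [if_neg (h j (List.mem_cons_self))]
    exact IH st (fun i hi => h i (List.mem_cons_of_mem _ hi))

theorem bfs_spec : Claim_equal_bfs := by
  intro start_point graph visited connected _hdom hpre
  show bfs start_point graph visited connected
    = bfs_alt start_point graph visited connected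
  rcases hpre with ⟨_, _, h3⟩ | ⟨hs, hg, hc, hcr, hgr⟩
  · -- depth-1 halt: the start row is scanned and nothing is traversable
    have hskip : ∀ j ∈ PySem.List.pyGetD graph start_point [],
        ¬(PySem.List.pyGet? (PySem.List.pySetD visited start_point 1) j = some 0 ∧
          PySem.List.pyGetD (PySem.List.pyGetD connected start_point []) j 1 = 0) := by
      intro j hj hcontra
      exact ((h3 j hj).2 hcontra.1).2.2 hcontra.2
    unfold bfs bfs_alt
    rw [bfsLoop]
    rw [pvSkipRowA connected start_point (PySem.List.pyGetD graph start_point []) []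
      (PySem.List.pySetD visited start_point 1) 1 hskip]
    rw [bfsLoop]
    rw [dfsGo]
    rw [pvSkipRowB graph connected start_point (visited.count 0)
      (PySem.List.pyGetD graph start_point [])
      (1, PySem.List.pySetD visited start_point 1) hskip]
  · -- well-formed instance: BFS = machine (breadth order) = machine (depth order) = DFS
    unfold bfs bfs_alt
    rw [pvA2M graph connected
      (1 + (PySem.List.pySetD visited start_point 1).count 0)
      [start_point] (PySem.List.pySetD visited start_point 1) 1 (by simp)]
    simp only [List.map_cons, List.map_nil]
    rw [pvRunBD graph connected visited.length hg hc
      ((PySem.List.pySetD visited start_point 1).count 0)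
      (asize [(start_point, PySem.List.pyGetD graph start_point [])]) _ _ _
      (pvLen_mark visited start_point) le_rfl le_rfl]
    rw [pvB2M graph connected (visited.count 0 + 1) start_point visited [] 1
      (by have := pvCount0_mark_le visited start_point; omega)]
    rw [runD_nil]
    ring
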